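-- pv_equiv track=rewrite | github.com/tkamsker/gha1javarag | src/parsers/java_parser.py | _extract_comments_at_position
-- ===== SOURCE A (Python) =====
-- def _extract_comments_at_position(content: str, position: int) -> str:
--     """Extract comments at a specific position."""
--     before_position = content[:position]
--     lines = before_position.split('\n')
--
--     comments = []
--     for line in reversed(lines):
--         line = line.strip()
--         if not line:
--             continue
--         if line.startswith('//'):
--             comments.insert(0, line[2:].strip())
--         elif line.startswith('/*') and line.endswith('*/'):
--             comment = line[2:-2].strip()
--             comments.insert(0, comment)
--         else:
--             break
--
--     return '\n'.join(comments)
-- ===== SOURCE B (Python) =====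
-- def _extract_comments_at_position(content: str, position: int) -> str:
--     """Extract comments at a specific position (forward scan with reset)."""
--     comments = []
--     for line in content[:position].split('\n'):
--         line = line.strip()
--         if not line:
--             continue
--         if line.startswith('//'):
--             comments.append(line[2:].strip())
--         elif line.startswith('/*') and line.endswith('*/'):
--             comments.append(line[2:-2].strip())
--         else:
--             comments = []
--     return '\n'.join(comments)
-- ===== Notes on version B (the rewrite author's own statement) =====
-- stated objective: simpler
-- what changed: Replaces the reversed-iteration with break and insert(0) by a single forward scan that appends comments and resets the accumulator on any non-comment non-blank line, so the trailing contiguous comment block is what survives.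
import Mathlib
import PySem

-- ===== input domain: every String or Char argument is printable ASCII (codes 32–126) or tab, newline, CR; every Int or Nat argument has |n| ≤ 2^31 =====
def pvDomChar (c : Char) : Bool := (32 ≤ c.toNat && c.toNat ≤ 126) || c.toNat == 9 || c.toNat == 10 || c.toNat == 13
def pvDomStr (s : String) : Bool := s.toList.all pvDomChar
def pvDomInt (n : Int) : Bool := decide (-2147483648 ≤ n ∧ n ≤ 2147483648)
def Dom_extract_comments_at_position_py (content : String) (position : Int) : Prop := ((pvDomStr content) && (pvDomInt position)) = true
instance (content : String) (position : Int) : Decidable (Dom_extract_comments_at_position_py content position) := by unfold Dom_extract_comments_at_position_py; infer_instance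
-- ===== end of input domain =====

-- B replaces A's reversed iteration with break/insert(0) by a forward scan that appends and resets on a non-comment line ("simpler" decomposition; no speed claim).


-- ===== PORT A =====
-- A's loop over reversed(lines) with break and comments.insert(0, …)
def pvAloop : List String → List String → List String
  | [], comments => comments
  | l :: rest, comments =>
    let line := PySem.Str.strip l
    if line = "" then pvAloop rest comments
    else if PySem.Str.startswith line "//" then
      pvAloop rest (PySem.List.insert comments 0 (PySem.Str.strip (PySem.Str.slice line (some 2) none)))
    else if PySem.Str.startswith line "/*" && PySem.Str.endswith line "*/" then
      pvAloop rest (PySem.List.insert comments 0 (PySem.Str.strip (PySem.Str.slice line (some 2) (some (-2)))))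
    else comments  -- break

def extract_comments_at_position_py (content : String) (position : Int) : String :=
  let before_position := PySem.Str.slice content none (some position)
  let lines := (PySem.Str.split? before_position "\n").getD []  -- separator is non-empty: split? is some
  PySem.Str.join "\n" (pvAloop lines.reverse [])

-- ===== PORT B =====
-- B's forward fold: append comments, reset on any other non-blank line
def pvBstep (comments : List String) (l : String) : List String :=
  let line := PySem.Str.strip l
  if line = "" then comments
  else if PySem.Str.startswith line "//" then
    comments ++ [PySem.Str.strip (PySem.Str.slice line (some 2) none)]
  else if PySem.Str.startswith line "/*" && PySem.Str.endswith line "*/" then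
    comments ++ [PySem.Str.strip (PySem.Str.slice line (some 2) (some (-2)))]
  else []

def extract_comments_at_position_py_alt (content : String) (position : Int) : String :=
  PySem.Str.join "\n"
    ((((PySem.Str.split? (PySem.Str.slice content none (some position)) "\n").getD []).foldl pvBstep []))

-- ===== PRECONDITION & SPEC =====
def Spec_extract_comments_at_position_py (content : String) (position : Int) (out : String) : Prop := out = extract_comments_at_position_py_alt content position
instance (content : String) (position : Int) (out : String) : Decidable (Spec_extract_comments_at_position_py content position out) := by unfold Spec_extract_comments_at_position_py; infer_instance

-- ===== CLAIM (what is proved, stated in full; the proofs are below) =====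
def Claim_equal_extract_comments_at_position_py : Prop := ∀ (content : String) (position : Int), Dom_extract_comments_at_position_py content position → Spec_extract_comments_at_position_py content position (extract_comments_at_position_py content position)

-- ===== LEMMAS AND PROOFS =====

-- A's backward loop, started on rlines with accumulator acc, equals B's forward fold over rlines.reverse followed by acc.
theorem pvAloop_eq_foldl (rlines : List String) (acc : List String) :
    pvAloop rlines acc = rlines.reverse.foldl pvBstep [] ++ acc := by
  induction rlines generalizing acc with
  | nil => simp [pvAloop]
  | cons l rest ih =>
    rw [List.reverse_cons, List.foldl_append, List.foldl_cons, List.foldl_nil]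
    simp only [pvAloop, pvBstep]
    split_ifs with h1 h2 h3
    · exact ih acc
    · rw [ih, PySem.List.insert_zero]; simp
    · rw [ih, PySem.List.insert_zero]; simp
    · simp

-- ===== VERDICT (by name: the statement is the Claim_ definition above) =====
theorem extract_comments_at_position_py_spec : Claim_equal_extract_comments_at_position_py := by
  intro content position _
  simp only [Spec_extract_comments_at_position_py, extract_comments_at_position_py, extract_comments_at_position_py_alt]
  rw [pvAloop_eq_foldl]
  simp
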